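-- pv_equiv track=rewrite | github.com/Yepvajia/SR_BOT | xp.py | getXP
-- ===== SOURCE A (Python) =====
-- def getXP(lvl):
--     n = 100
--     add = 55
--     if lvl == 0:
--         return 0
--     for i in range(1,lvl):
--             n += add
--             add += 10
--     return n
-- ===== SOURCE B (Python) =====
-- def getXP(lvl):
--     # closed-form arithmetic series instead of the O(lvl) loop
--     if lvl == 0:
--         return 0
--     m = max(lvl - 1, 0)
--     return 100 + 5 * m * (m + 10)
-- ===== Notes on version B (the rewrite author's own statement) =====
-- stated objective: faster
-- what changed: Replaced the O(lvl) accumulation loop with the closed-form arithmetic-series formula 100 + 5*m*(m+10) for m = max(lvl-1, 0).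
import Mathlib
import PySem

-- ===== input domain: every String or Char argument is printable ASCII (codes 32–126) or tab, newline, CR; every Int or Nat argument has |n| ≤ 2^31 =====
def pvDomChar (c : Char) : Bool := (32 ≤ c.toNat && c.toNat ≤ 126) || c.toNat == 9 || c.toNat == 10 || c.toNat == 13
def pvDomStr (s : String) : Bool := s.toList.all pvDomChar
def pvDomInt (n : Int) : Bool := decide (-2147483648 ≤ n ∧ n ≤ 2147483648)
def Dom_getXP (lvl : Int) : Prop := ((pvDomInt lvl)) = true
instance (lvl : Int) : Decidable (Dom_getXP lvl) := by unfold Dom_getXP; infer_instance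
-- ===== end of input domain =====

-- B replaces A's O(lvl) accumulation loop by the closed-form arithmetic-series formula (objective: faster).

-- ===== PORT A =====
def getXP (lvl : Int) : Int :=
  if lvl = 0 then 0
  else
    ((PySem.List.pyRange 1 lvl 1).foldl
      (fun (st : Int × Int) _ => (st.1 + st.2, st.2 + 10)) (100, 55)).1

-- ===== PORT B =====
def getXP_alt (lvl : Int) : Int :=
  if lvl = 0 then 0
  else
    let m := max (lvl - 1) 0
    100 + 5 * m * (m + 10)

-- ===== PRECONDITION & SPEC =====
def Spec_getXP (lvl : Int) (out : Int) : Prop := out = getXP_alt lvl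
instance (lvl : Int) (out : Int) : Decidable (Spec_getXP lvl out) := by unfold Spec_getXP; infer_instance

-- ===== CLAIM (what is proved, stated in full; the proofs are below) =====
def Claim_equal_getXP : Prop := ∀ (lvl : Int), Dom_getXP lvl → Spec_getXP lvl (getXP lvl)

-- ===== LEMMAS AND PROOFS =====
theorem getXP_loop (n : ℕ) (p : Int × Int) :
    ((List.range n).map (fun k : ℕ => (1 : Int) + k)).foldl
      (fun (st : Int × Int) _ => (st.1 + st.2, st.2 + 10)) p
    = (p.1 + n * p.2 + 5 * n * (n - 1), p.2 + 10 * n) := by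
  induction n generalizing p with
  | zero => simp
  | succ n ih =>
    rw [List.range_succ, List.map_append, List.foldl_append, ih]
    simp only [List.map_cons, List.map_nil, List.foldl_cons, List.foldl_nil]
    refine Prod.ext ?_ ?_ <;> (show _ = _; push_cast; ring)

-- ===== VERDICT (by name: the statement is the Claim_ definition above) =====
theorem getXP_spec : Claim_equal_getXP := by
  intro lvl _
  unfold Spec_getXP getXP getXP_alt
  by_cases h0 : lvl = 0
  · simp [h0]
  · simp only [h0, if_false]
    rw [PySem.List.pyRange_one, getXP_loop]
    rcases le_or_gt lvl 1 with h1 | h1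
    · have ht : (lvl - 1).toNat = 0 := by omega
      have hm : max (lvl - 1) 0 = 0 := by omega
      rw [ht, hm]; norm_num
    · have hm : max (lvl - 1) 0 = lvl - 1 := by omega
      have ht : ((lvl - 1).toNat : Int) = lvl - 1 := by omega
      rw [hm]; simp only [ht]; ring
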